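-- pv_equiv track=rewrite | github.com/ad-freiburg/tokenization-repair | scripts/create_pdftotext_benchmark.py | match_line
-- ===== SOURCE A (Python) =====
-- from typing import Optional, Tuple
--
-- def match_line(true_line, input_lines) -> Optional[Tuple[int, int]]:
--     for i, line in enumerate(input_lines):
--         if true_line.startswith(line):
--             j = i + 1
--             matched = line
--             while j < len(input_lines) and len(matched) < len(true_line):
--                 matched += input_lines[j]
--                 j += 1
--             if true_line == matched:
--                 return (i, j)
--     return None
-- ===== SOURCE B (Python) =====
-- def match_line(true_line, input_lines):
--     # Precompute the full concatenation and cumulative offsets once; a single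
--     # non-decreasing pointer j walks the offsets, and a candidate is verified
--     # by one slice comparison instead of repeated string concatenation.
--     L = len(true_line)
--     n = len(input_lines)
--     s = "".join(input_lines)
--     offsets = [0]
--     total = 0
--     for line in input_lines:
--         total += len(line)
--         offsets.append(total)
--     j = 0
--     for i in range(n):
--         if j < i + 1:
--             j = i + 1
--         while j < n and offsets[j] - offsets[i] < L:
--             j += 1
--         if offsets[j] - offsets[i] == L and s[offsets[i]:offsets[j]] == true_line:
--             return (i, j)
--     return None
-- ===== Notes on version B (the rewrite author's own statement) =====
-- stated objective: faster
-- what changed: B precomputes the joined text and cumulative line offsets once, advances a single non-decreasing pointer over the offsets instead of re-running A's per-start concatenation loop, and verifies a candidate by one slice comparison, eliminating all repeated string concatenation.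
import Mathlib
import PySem

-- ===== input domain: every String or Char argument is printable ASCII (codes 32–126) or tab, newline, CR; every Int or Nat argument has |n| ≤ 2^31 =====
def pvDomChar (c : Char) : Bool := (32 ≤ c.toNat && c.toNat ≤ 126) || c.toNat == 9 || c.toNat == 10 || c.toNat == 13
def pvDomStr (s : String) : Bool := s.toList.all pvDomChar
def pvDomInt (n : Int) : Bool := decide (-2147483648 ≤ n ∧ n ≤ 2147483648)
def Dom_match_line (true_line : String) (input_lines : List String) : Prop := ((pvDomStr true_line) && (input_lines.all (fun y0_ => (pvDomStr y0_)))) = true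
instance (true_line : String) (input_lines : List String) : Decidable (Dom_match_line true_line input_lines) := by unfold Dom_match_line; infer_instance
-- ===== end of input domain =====

-- B precomputes the joined text and cumulative offsets and walks them with one
-- non-decreasing pointer, removing A's repeated string concatenation (objective: faster).

-- ===== PORT A =====
-- the inner 'while j < len(input_lines) and len(matched) < len(true_line)' loop
def mlWhile (t : List Char) (ls : List (List Char)) (j : Nat) (matched : List Char) :
    Nat × List Char :=
  if j < ls.length ∧ matched.length < t.length then
    mlWhile t ls (j + 1) (matched ++ PySem.List.pyGetD ls (j : Int) [])
  else (j, matched)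
termination_by ls.length - j
decreasing_by omega

-- the outer 'for i, line in enumerate(input_lines)' loop
def mlOuter (t : List Char) (ls : List (List Char)) (i : Nat) (rest : List (List Char)) :
    Option (Int × Int) :=
  match rest with
  | [] => none
  | line :: rs =>
    if PySem.Chars.startswith t line then
      let r := mlWhile t ls (i + 1) line
      if t = r.2 then some ((i : Int), (r.1 : Int)) else mlOuter t ls (i + 1) rs
    else mlOuter t ls (i + 1) rs

def match_line (true_line : String) (input_lines : List String) : Option (Int × Int) :=
  mlOuter true_line.toList (input_lines.map String.toList) 0 (input_lines.map String.toList)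

-- ===== PORT B =====
-- offsets = [0]; total = 0; for line in input_lines: total += len(line); offsets.append(total)
def mlbOffs (ls : List (List Char)) : List Nat :=
  (ls.foldl (fun st line => (st.1 + line.length, st.2 ++ [st.1 + line.length])) (0, [0])).2

-- while j < n and offsets[j] - offsets[i] < L: j += 1
def mlbWhile (offs : List Nat) (n L oi : Nat) (j : Nat) : Nat :=
  if j < n ∧ offs.getD j 0 - oi < L then mlbWhile offs n L oi (j + 1) else j
termination_by n - j
decreasing_by omega

-- for i in range(n): …
def mlbOuter (t s : List Char) (offs : List Nat) (n L : Nat) (i j : Nat) :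
    Option (Int × Int) :=
  if i < n then
    let j1 := if j < i + 1 then i + 1 else j
    let j2 := mlbWhile offs n L (offs.getD i 0) j1
    if offs.getD j2 0 - offs.getD i 0 = L ∧
        PySem.List.slice s (some ((offs.getD i 0 : Nat) : Int)) (some ((offs.getD j2 0 : Nat) : Int)) = t then
      some ((i : Int), (j2 : Int))
    else mlbOuter t s offs n L (i + 1) j2
  else none
termination_by n - i
decreasing_by omega

def match_line_alt (true_line : String) (input_lines : List String) : Option (Int × Int) :=
  let t := true_line.toList
  let ls := input_lines.map String.toList
  mlbOuter t ls.flatten (mlbOffs ls) ls.length t.length 0 0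

-- ===== PRECONDITION & SPEC =====
def Spec_match_line (true_line : String) (input_lines : List String) (out : Option (Int × Int)) : Prop := out = match_line_alt true_line input_lines
instance (true_line : String) (input_lines : List String) (out : Option (Int × Int)) : Decidable (Spec_match_line true_line input_lines out) := by unfold Spec_match_line; infer_instance

-- ===== CLAIM (what is proved, stated in full; the proofs are below) =====
def Claim_equal_match_line : Prop := ∀ (true_line : String) (input_lines : List String), Dom_match_line true_line input_lines → Spec_match_line true_line input_lines (match_line true_line input_lines)

-- ===== LEMMAS AND PROOFS =====

-- cumulative length of the first k lines
def cumOf (ls : List (List Char)) (k : Nat) : Nat := ((ls.take k).flatten).length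

-- the segment consisting of lines i … j-1, concatenated
def segOf (ls : List (List Char)) (i j : Nat) : List Char := ((ls.drop i).take (j - i)).flatten

-- abstract version of both inner loops
def fStop (n L : Nat) (cum : Nat → Nat) (i j : Nat) : Nat :=
  if j < n ∧ cum j - cum i < L then fStop n L cum i (j + 1) else j
termination_by n - j
decreasing_by omega

theorem mlOuter_cons (t : List Char) (ls : List (List Char)) (i : Nat)
    (line : List Char) (rs : List (List Char)) :
    mlOuter t ls i (line :: rs) =
      if PySem.Chars.startswith t line then
        (if t = (mlWhile t ls (i + 1) line).2 then
          some ((i : Int), ((mlWhile t ls (i + 1) line).1 : Int))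
        else mlOuter t ls (i + 1) rs)
      else mlOuter t ls (i + 1) rs := by
  rw [mlOuter]

theorem mlbOuter_unfold (t s : List Char) (offs : List Nat) (n L i j : Nat) :
    mlbOuter t s offs n L i j =
      if i < n then
        (if offs.getD (mlbWhile offs n L (offs.getD i 0) (if j < i + 1 then i + 1 else j)) 0
              - offs.getD i 0 = L ∧
            PySem.List.slice s (some ((offs.getD i 0 : Nat) : Int))
              (some ((offs.getD
                (mlbWhile offs n L (offs.getD i 0) (if j < i + 1 then i + 1 else j)) 0 : Nat) : Int))
              = t then
          some ((i : Int),
            ((mlbWhile offs n L (offs.getD i 0) (if j < i + 1 then i + 1 else j) : Nat) : Int))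
        else mlbOuter t s offs n L (i + 1)
          (mlbWhile offs n L (offs.getD i 0) (if j < i + 1 then i + 1 else j)))
      else none := by
  rw [mlbOuter]

theorem seg_len (ls : List (List Char)) (i j : Nat) (hij : i ≤ j) :
    cumOf ls j = cumOf ls i + (segOf ls i j).length := by
  unfold cumOf segOf
  have h : j = i + (j - i) := by omega
  conv_lhs => rw [h]
  rw [List.take_add, List.flatten_append, List.length_append]

theorem cum_mono (ls : List (List Char)) (i j : Nat) (hij : i ≤ j) :
    cumOf ls i ≤ cumOf ls j := by
  rw [seg_len ls i j hij]; omega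

theorem seg_split (ls : List (List Char)) (i m j : Nat) (him : i ≤ m) (hmj : m ≤ j) :
    segOf ls i j = segOf ls i m ++ segOf ls m j := by
  unfold segOf
  have h1 : j - i = (m - i) + (j - m) := by omega
  rw [h1, List.take_add, List.flatten_append, List.drop_drop]
  have h2 : i + (m - i) = m := by omega
  rw [h2]

theorem seg_self (ls : List (List Char)) (i : Nat) : segOf ls i i = [] := by
  unfold segOf; simp

theorem seg_succ (ls : List (List Char)) (i j : Nat) (hij : i ≤ j) (hj : j < ls.length) :
    segOf ls i (j + 1) = segOf ls i j ++ ls.getD j [] := by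
  rw [seg_split ls i j (j+1) hij (by omega)]
  unfold segOf
  have h1 : j + 1 - j = 1 := by omega
  have h2 : ls.drop j = ls[j] :: ls.drop (j+1) := List.drop_eq_getElem_cons hj
  rw [h1, h2, List.getD_eq_getElem ls [] hj]
  simp only [List.take_succ_cons, List.take_zero, List.flatten_cons, List.flatten_nil,
    List.append_nil]

theorem seg_one (ls : List (List Char)) (i : Nat) (hi : i < ls.length) :
    segOf ls i (i + 1) = ls.getD i [] := by
  rw [seg_succ ls i i le_rfl hi, seg_self]; simp

theorem slice_eq_seg (ls : List (List Char)) (i j : Nat) (hij : i ≤ j) :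
    PySem.List.slice ls.flatten (some ((cumOf ls i : Nat) : Int)) (some ((cumOf ls j : Nat) : Int))
      = segOf ls i j := by
  rw [PySem.List.slice_natCast]
  have hflat : ls.flatten = (ls.take i).flatten ++ (ls.drop i).flatten := by
    conv_lhs => rw [(List.take_append_drop i ls).symm]
    rw [List.flatten_append]
  have hdrop : ls.flatten.drop (cumOf ls i) = (ls.drop i).flatten := by
    rw [hflat]
    simp only [cumOf]
    exact List.drop_left
  rw [hdrop]
  have hlen : cumOf ls j - cumOf ls i = (segOf ls i j).length := by
    rw [seg_len ls i j hij]; omega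
  rw [hlen]
  have hsplit2 : (ls.drop i).flatten = segOf ls i j ++ ((ls.drop i).drop (j - i)).flatten := by
    conv_lhs => rw [(List.take_append_drop (j - i) (ls.drop i)).symm]
    rw [List.flatten_append]
    rfl
  rw [hsplit2]
  exact List.take_left

-- facts about the abstract stopping-point function
theorem fStop_ge (n L : Nat) (cum : Nat → Nat) (i j : Nat) : j ≤ fStop n L cum i j := by
  induction hd : n - j generalizing j with
  | zero =>
    rw [fStop, if_neg (by omega)]
  | succ d ih =>
    rw [fStop]
    by_cases h : j < n ∧ cum j - cum i < L
    · rw [if_pos h]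
      have := ih (j + 1) (by omega)
      omega
    · rw [if_neg h]

theorem fStop_le_of_stop (n L : Nat) (cum : Nat → Nat) (i j k : Nat) (hjk : j ≤ k)
    (hk : ¬ (k < n ∧ cum k - cum i < L)) : fStop n L cum i j ≤ k := by
  induction hd : k - j generalizing j with
  | zero =>
    have hjk' : j = k := by omega
    subst hjk'
    rw [fStop, if_neg hk]
  | succ d ih =>
    rw [fStop]
    by_cases h : j < n ∧ cum j - cum i < L
    · rw [if_pos h]
      have hne : j ≠ k := by rintro rfl; exact hk h
      exact ih (j + 1) (by omega) (by omega)
    · rw [if_neg h]; exact hjk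

theorem fStop_stop_at (n L : Nat) (cum : Nat → Nat) (i j : Nat) :
    ¬ (fStop n L cum i j < n ∧ cum (fStop n L cum i j) - cum i < L) := by
  induction hd : n - j generalizing j with
  | zero =>
    have h : ¬ (j < n ∧ cum j - cum i < L) := by omega
    rw [fStop, if_neg h]
    exact h
  | succ d ih =>
    by_cases h : j < n ∧ cum j - cum i < L
    · rw [fStop, if_pos h]
      exact ih (j + 1) (by omega)
    · rw [fStop, if_neg h]
      exact h

theorem fStop_between (n L : Nat) (cum : Nat → Nat) (i j k : Nat) (hjk : j ≤ k)
    (hk : k ≤ fStop n L cum i j) : fStop n L cum i k = fStop n L cum i j := by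
  induction hd : k - j generalizing j with
  | zero =>
    have hjk' : j = k := by omega
    subst hjk'; rfl
  | succ d ih =>
    have hj : j < n ∧ cum j - cum i < L := by
      by_contra h
      have hx : fStop n L cum i j = j := by rw [fStop, if_neg h]
      omega
    have hstep : fStop n L cum i j = fStop n L cum i (j + 1) := by
      rw [fStop, if_pos hj]
    have hne : j ≠ k := by
      rintro rfl
      omega
    rw [hstep]
    rw [hstep] at hk
    exact ih (j + 1) (by omega) hk (by omega)

theorem fStop_le_n (n L : Nat) (cum : Nat → Nat) (i j : Nat) (hj : j ≤ n) :
    fStop n L cum i j ≤ n :=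
  fStop_le_of_stop n L cum i j n hj (by omega)

-- A's inner while loop computes the abstract stopping point and the segment up to it
theorem mlWhile_eq (t : List Char) (ls : List (List Char)) (i : Nat) :
    ∀ j, i ≤ j →
    mlWhile t ls j (segOf ls i j) =
      (fStop ls.length t.length (cumOf ls) i j,
       segOf ls i (fStop ls.length t.length (cumOf ls) i j)) := by
  intro j
  induction hd : ls.length - j generalizing j with
  | zero =>
    intro hij
    rw [mlWhile, if_neg (by omega), fStop, if_neg (by omega)]
  | succ d ih =>
    intro hij
    have hlen : cumOf ls j - cumOf ls i = (segOf ls i j).length := by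
      rw [seg_len ls i j hij]; omega
    by_cases h : j < ls.length ∧ (segOf ls i j).length < t.length
    · have h' : j < ls.length ∧ cumOf ls j - cumOf ls i < t.length := by omega
      rw [mlWhile, if_pos h, fStop, if_pos h']
      have hseg : segOf ls i j ++ PySem.List.pyGetD ls (j : Int) [] = segOf ls i (j + 1) := by
        rw [seg_succ ls i j hij h.1, PySem.List.pyGetD_natCast]
      rw [hseg]
      exact ih (j + 1) (by omega) (by omega)
    · have h' : ¬ (j < ls.length ∧ cumOf ls j - cumOf ls i < t.length) := by omega
      rw [mlWhile, if_neg h, fStop, if_neg h']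

-- the offsets list built by B holds the cumulative lengths
theorem mlbOffs_foldl (ls : List (List Char)) :
    ∀ (t0 : Nat) (acc : List Nat),
      ls.foldl (fun st line => (st.1 + line.length, st.2 ++ [st.1 + line.length])) (t0, acc)
        = (t0 + cumOf ls ls.length,
           acc ++ (List.range ls.length).map (fun k => t0 + cumOf ls (k + 1))) := by
  induction ls with
  | nil => intro t0 acc; simp [cumOf]
  | cons line rest ih =>
    intro t0 acc
    simp only [List.foldl_cons]
    rw [ih (t0 + line.length) (acc ++ [t0 + line.length])]
    have hc : ∀ k, cumOf (line :: rest) (k + 1) = line.length + cumOf rest k := by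
      intro k; unfold cumOf; simp
    simp only [Prod.mk.injEq, List.length_cons]
    refine ⟨?_, ?_⟩
    · rw [hc rest.length]; omega
    · rw [List.range_succ_eq_map, List.map_cons, List.map_map, List.append_assoc,
        List.singleton_append]
      congr 1
      rw [hc 0]
      have hmap : (List.range rest.length).map
            ((fun k => t0 + cumOf (line :: rest) (k + 1)) ∘ Nat.succ)
          = (List.range rest.length).map
            (fun k => t0 + line.length + cumOf rest (k + 1)) := by
        apply List.map_congr_left
        intro k _
        simp only [Function.comp_apply]
        rw [hc (k + 1)]
        omega
      rw [hmap]
      have hc0 : cumOf rest 0 = 0 := by simp [cumOf]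
      rw [hc0]
      simp

theorem mlbOffs_getD (ls : List (List Char)) (k : Nat) (hk : k ≤ ls.length) :
    (mlbOffs ls).getD k 0 = cumOf ls k := by
  unfold mlbOffs
  rw [mlbOffs_foldl ls 0 [0]]
  simp only [Nat.zero_add]
  cases k with
  | zero => simp [cumOf]
  | succ m =>
    have hm : m < ls.length := by omega
    have hstep : ([0] ++ (List.range ls.length).map (fun k => cumOf ls (k + 1))).getD (m + 1) 0
        = ((List.range ls.length).map (fun k => cumOf ls (k + 1))).getD m 0 := rfl
    rw [hstep, List.getD_eq_getElem _ 0 (by simpa using hm)]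
    simp

-- B's inner while loop computes the same abstract stopping point
theorem mlbWhile_eq (offs : List Nat) (n L : Nat) (cum : Nat → Nat) (i : Nat)
    (hoffs : ∀ k, k < n → offs.getD k 0 = cum k) :
    ∀ j, mlbWhile offs n L (cum i) j = fStop n L cum i j := by
  intro j
  induction hd : n - j generalizing j with
  | zero =>
    rw [mlbWhile, if_neg (by omega), fStop, if_neg (by omega)]
  | succ d ih =>
    by_cases h : j < n ∧ offs.getD j 0 - cum i < L
    · have h' : j < n ∧ cum j - cum i < L := by
        refine ⟨h.1, ?_⟩
        rw [← hoffs j h.1]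
        exact h.2
      rw [mlbWhile, if_pos h, fStop, if_pos h']
      exact ih (j + 1) (by omega)
    · have h' : ¬ (j < n ∧ cum j - cum i < L) := by
        intro hc
        exact h ⟨hc.1, by rw [hoffs j hc.1]; exact hc.2⟩
      rw [mlbWhile, if_neg h, fStop, if_neg h']

-- the outer loops agree
theorem outer_eq (t : List Char) (ls : List (List Char)) :
    ∀ i j, j ≤ ls.length →
      (i < ls.length → j ≤ fStop ls.length t.length (cumOf ls) i (i + 1)) →
      mlOuter t ls i (ls.drop i)
        = mlbOuter t ls.flatten (mlbOffs ls) ls.length t.length i j := by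
  intro i
  induction hd : ls.length - i generalizing i with
  | zero =>
    intro j _ _
    have hi : ls.length ≤ i := by omega
    rw [List.drop_eq_nil_of_le hi, mlOuter, mlbOuter_unfold, if_neg (by omega)]
  | succ d ih =>
    intro j hjn hinv
    have hi : i < ls.length := by omega
    set n := ls.length with hn
    set L := t.length with hL
    set cum := cumOf ls with hcum
    set e := fStop n L cum i (i + 1) with he
    have hie : i + 1 ≤ e := fStop_ge n L cum i (i + 1)
    have hen : e ≤ n := fStop_le_n n L cum i (i + 1) hi
    have hoffs : ∀ k, k ≤ n → (mlbOffs ls).getD k 0 = cum k := fun k hk => mlbOffs_getD ls k hk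
    rw [mlbOuter_unfold, if_pos hi]
    have hj1 : (if j < i + 1 then i + 1 else j) = max j (i + 1) := by
      split_ifs with h <;> omega
    rw [hj1]
    have hmaxle : max j (i + 1) ≤ e := by
      have := hinv hi; omega
    have hw : mlbWhile (mlbOffs ls) n L ((mlbOffs ls).getD i 0) (max j (i + 1)) = e := by
      rw [hoffs i (by omega),
        mlbWhile_eq (mlbOffs ls) n L cum i (fun k hk => hoffs k (by omega)) (max j (i + 1))]
      exact fStop_between n L cum i (i + 1) (max j (i + 1)) (by omega) hmaxle
    rw [hw]
    -- B's firing condition is 'segment = t'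
    have hBcond : ((mlbOffs ls).getD e 0 - (mlbOffs ls).getD i 0 = L ∧
        PySem.List.slice ls.flatten (some (((mlbOffs ls).getD i 0 : Nat) : Int))
          (some (((mlbOffs ls).getD e 0 : Nat) : Int)) = t)
        ↔ segOf ls i e = t := by
      rw [hoffs i (by omega), hoffs e hen, slice_eq_seg ls i e (by omega)]
      have hlen : cum e - cum i = (segOf ls i e).length := by
        rw [hcum, seg_len ls i e (by omega)]; omega
      constructor
      · rintro ⟨_, h2⟩; exact h2
      · intro hseg
        refine ⟨?_, hseg⟩
        rw [hlen, hseg]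
    -- unfold one step of A
    rw [List.drop_eq_getElem_cons hi, mlOuter_cons]
    have hline : ls[i] = segOf ls i (i + 1) := by
      rw [seg_one ls i hi, List.getD_eq_getElem ls [] hi]
    have hrw : mlWhile t ls (i + 1) ls[i] = (e, segOf ls i e) := by
      rw [hline]; exact mlWhile_eq t ls i (i + 1) (by omega)
    have hrw1 : (mlWhile t ls (i + 1) ls[i]).1 = e := by rw [hrw]
    have hrw2 : (mlWhile t ls (i + 1) ls[i]).2 = segOf ls i e := by rw [hrw]
    have hrec : mlOuter t ls (i + 1) (ls.drop (i + 1))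
        = mlbOuter t ls.flatten (mlbOffs ls) n L (i + 1) e := by
      apply ih (i + 1) (by omega) e hen
      intro hi1
      set e' := fStop n L cum (i + 1) (i + 2) with he'
      have hstop : ¬ (e' < n ∧ cum e' - cum (i + 1) < L) := fStop_stop_at n L cum (i + 1) (i + 2)
      have hge' : i + 2 ≤ e' := fStop_ge n L cum (i + 1) (i + 2)
      have hmono : cum i ≤ cum (i + 1) := cum_mono ls i (i + 1) (by omega)
      have hstop' : ¬ (e' < n ∧ cum e' - cum i < L) := by omega
      exact fStop_le_of_stop n L cum i (i + 1) e' (by omega) hstop'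
    by_cases hfire : segOf ls i e = t
    · have hsw : PySem.Chars.startswith t ls[i] = true := by
        rw [PySem.Chars.startswith_iff, hline]
        rw [seg_split ls i (i + 1) e (by omega) hie] at hfire
        exact ⟨segOf ls (i + 1) e, hfire⟩
      rw [if_pos hsw, hrw1, hrw2, if_pos hfire.symm, if_pos (hBcond.mpr hfire)]
    · have hBc : ¬ ((mlbOffs ls).getD e 0 - (mlbOffs ls).getD i 0 = L ∧
          PySem.List.slice ls.flatten (some (((mlbOffs ls).getD i 0 : Nat) : Int))
            (some (((mlbOffs ls).getD e 0 : Nat) : Int)) = t) := fun h => hfire (hBcond.mp h)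
      rw [if_neg hBc]
      by_cases hsw : PySem.Chars.startswith t ls[i] = true
      · rw [if_pos hsw, hrw1, hrw2, if_neg (fun h => hfire h.symm)]
        exact hrec
      · rw [if_neg hsw]
        exact hrec

-- ===== VERDICT (by name: the statement is the Claim_ definition above) =====
theorem match_line_spec : Claim_equal_match_line := by
  intro true_line input_lines _
  unfold Spec_match_line match_line match_line_alt
  have h := outer_eq true_line.toList (input_lines.map String.toList) 0 0
    (by omega) (fun _ => by omega)
  simpa using h
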